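-- pv_equiv track=rewrite | github.com/CavPeng/ALLElectronics | main.py | count_age_computer
-- ===== SOURCE A (Python) =====
-- def self_count(age, class_computer, keyword):
--     if age == keyword:
--         if class_computer == 'yes':
--             return 1, 0
--         else:
--             return 0, 1
--     return 0, 0
--
-- def count_age_computer(list_age, list_class_computer):
--     a1 = 0
--     a2 = 0
--     b1 = 0
--     b2 = 0
--     c1 = 0
--     c2 = 0
--     for i in range(len(list_age)):
--         int_yes, int_no = self_count(list_age[i], list_class_computer[i], 'youth')
--         a1 += int_yes
--         a2 += int_no
--         int_yes, int_no = self_count(list_age[i], list_class_computer[i], 'middle_age')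
--         b1 += int_yes
--         b2 += int_no
--         int_yes, int_no = self_count(list_age[i], list_class_computer[i], 'senior')
--         c1 += int_yes
--         c2 += int_no
--     return a1, a2, b1, b2, c1, c2
-- ===== SOURCE B (Python) =====
-- def count_age_computer(list_age, list_class_computer):
--     yes_ages = [a for a, c in zip(list_age, list_class_computer) if c == 'yes']
--     a1 = yes_ages.count('youth')
--     b1 = yes_ages.count('middle_age')
--     c1 = yes_ages.count('senior')
--     return (a1, list_age.count('youth') - a1,
--             b1, list_age.count('middle_age') - b1,
--             c1, list_age.count('senior') - c1)
-- ===== Notes on version B (the rewrite author's own statement) =====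
-- stated objective: faster
-- what changed: A accumulates six scalar counters with three keyword-specific helper calls per index; B stages the work differently: it first filters out the ages whose class is 'yes', then gets each yes-count with list.count on that filtered list and each no-count by subtracting it from the keyword's total count in list_age (valid since the class list covers every age under Pre_), replacing per-element Python-level branching by C-level zip/filter/count passes.
import Mathlib
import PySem

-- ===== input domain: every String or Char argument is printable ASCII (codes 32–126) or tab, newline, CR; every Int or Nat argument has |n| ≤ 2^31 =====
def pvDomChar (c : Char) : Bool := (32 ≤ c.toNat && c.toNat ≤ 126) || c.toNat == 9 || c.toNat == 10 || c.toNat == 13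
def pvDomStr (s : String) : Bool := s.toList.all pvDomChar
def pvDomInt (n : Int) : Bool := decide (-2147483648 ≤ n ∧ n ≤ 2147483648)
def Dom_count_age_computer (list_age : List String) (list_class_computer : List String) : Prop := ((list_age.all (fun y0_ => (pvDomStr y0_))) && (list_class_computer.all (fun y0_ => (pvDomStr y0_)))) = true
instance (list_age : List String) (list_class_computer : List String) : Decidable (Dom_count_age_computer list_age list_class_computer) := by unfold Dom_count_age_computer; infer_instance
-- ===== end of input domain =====

-- B replaces A's six scalar counters fed by three keyword-specific helper calls per element with a
-- staged decomposition: filter the 'yes'-classified ages once, read yes-counts off with list.count,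
-- and derive each no-count by subtracting from the keyword's total count (objective: faster, measured).


-- ===== PORT A =====
def selfCount (age : String) (class_computer : String) (keyword : String) : Int × Int :=
  if age == keyword then
    if class_computer == "yes" then (1, 0) else (0, 1)
  else (0, 0)

-- list_age[i] and list_class_computer[i] are ported with pyGetD; inside Pre_ every index is in range,
-- so the default "" is never read and the port is exact there.
def count_age_computer (list_age : List String) (list_class_computer : List String) : Int × Int × Int × Int × Int × Int :=
  (PySem.List.pyRange 0 (list_age.length : Int) 1).foldl
    (fun (s : Int × Int × Int × Int × Int × Int) i =>
      let age := PySem.List.pyGetD list_age i ""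
      let cc := PySem.List.pyGetD list_class_computer i ""
      let p1 := selfCount age cc "youth"
      let p2 := selfCount age cc "middle_age"
      let p3 := selfCount age cc "senior"
      (s.1 + p1.1, s.2.1 + p1.2, s.2.2.1 + p2.1, s.2.2.2.1 + p2.2,
       s.2.2.2.2.1 + p3.1, s.2.2.2.2.2 + p3.2))
    (0, 0, 0, 0, 0, 0)

-- ===== PORT B =====
def count_age_computer_alt (list_age : List String) (list_class_computer : List String) : Int × Int × Int × Int × Int × Int :=
  let yes_ages := ((list_age.zip list_class_computer).filter (fun z => z.2 == "yes")).map Prod.fst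
  let a1 : Int := (PySem.List.count yes_ages "youth" : Int)
  let b1 : Int := (PySem.List.count yes_ages "middle_age" : Int)
  let c1 : Int := (PySem.List.count yes_ages "senior" : Int)
  (a1, (PySem.List.count list_age "youth" : Int) - a1,
   b1, (PySem.List.count list_age "middle_age" : Int) - b1,
   c1, (PySem.List.count list_age "senior" : Int) - c1)

-- ===== PRECONDITION & SPEC =====
-- Pre_ excludes the inputs where list_class_computer is shorter than list_age, on which A raises IndexError.
def Pre_count_age_computer (list_age : List String) (list_class_computer : List String) : Prop :=
  list_age.length ≤ list_class_computer.length
instance (list_age : List String) (list_class_computer : List String) : Decidable (Pre_count_age_computer list_age list_class_computer) := by unfold Pre_count_age_computer; infer_instance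

def pvWitness_count_age_computer : List String × List String := (["youth", "senior"], ["yes", "no"])

def Spec_count_age_computer (list_age : List String) (list_class_computer : List String) (out : Int × Int × Int × Int × Int × Int) : Prop := out = count_age_computer_alt list_age list_class_computer
instance (list_age : List String) (list_class_computer : List String) (out : Int × Int × Int × Int × Int × Int) : Decidable (Spec_count_age_computer list_age list_class_computer out) := by unfold Spec_count_age_computer; infer_instance

-- ===== CLAIM (what is proved, stated in full; the proofs are below) =====
def Claim_equal_count_age_computer : Prop := ∀ (list_age : List String) (list_class_computer : List String), Dom_count_age_computer list_age list_class_computer → Pre_count_age_computer list_age list_class_computer → Spec_count_age_computer list_age list_class_computer (count_age_computer list_age list_class_computer)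


-- ===== LEMMAS AND PROOFS =====

-- the six (age, class=='yes') classes, as Bool predicates on a zipped pair
def pY (z : String × String) : Bool := z.1 == "youth" && (z.2 == "yes")
def pYn (z : String × String) : Bool := z.1 == "youth" && !(z.2 == "yes")
def pM (z : String × String) : Bool := z.1 == "middle_age" && (z.2 == "yes")
def pMn (z : String × String) : Bool := z.1 == "middle_age" && !(z.2 == "yes")
def pS (z : String × String) : Bool := z.1 == "senior" && (z.2 == "yes")
def pSn (z : String × String) : Bool := z.1 == "senior" && !(z.2 == "yes")

-- splitting a countP on a second condition
lemma countP_split {α : Type} (l : List α) (a b : α → Bool) :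
    l.countP (fun z => a z && b z) + l.countP (fun z => a z && !b z) = l.countP a := by
  induction l with
  | nil => simp
  | cons x l ih =>
    cases ha : a x <;> cases hb : b x <;>
      simp [ha, hb] <;> omega

-- B's yes-count for keyword k is the countP of (fst == k && snd == "yes") over the zip
lemma yes_count_eq (la lc : List String) (k : String) :
    PySem.List.count (((la.zip lc).filter (fun z => z.2 == "yes")).map Prod.fst) k
      = (la.zip lc).countP (fun z => z.1 == k && (z.2 == "yes")) := by
  rw [PySem.List.count_eq]
  rw [List.count_eq_countP, List.countP_map, List.countP_filter]
  apply List.countP_congr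
  intro z _
  simp [Function.comp]

-- the total count of keyword k in la equals its countP over the zip, when lc covers la
lemma total_count_eq (la lc : List String) (k : String) (h : la.length ≤ lc.length) :
    PySem.List.count la k = (la.zip lc).countP (fun z => z.1 == k) := by
  rw [PySem.List.count_eq, List.count_eq_countP]
  conv_lhs => rw [← List.map_fst_zip h]
  rw [List.countP_map]
  apply List.countP_congr
  intro z _
  simp [Function.comp]

-- B returns the six class counts over the zipped list
lemma alt_eq_counts (la lc : List String) (h : la.length ≤ lc.length) :
    count_age_computer_alt la lc =
      (((la.zip lc).countP pY : Int), ((la.zip lc).countP pYn : Int),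
       ((la.zip lc).countP pM : Int), ((la.zip lc).countP pMn : Int),
       ((la.zip lc).countP pS : Int), ((la.zip lc).countP pSn : Int)) := by
  show (_, _, _, _, _, _) = _
  rw [yes_count_eq la lc "youth", yes_count_eq la lc "middle_age", yes_count_eq la lc "senior",
    total_count_eq la lc "youth" h, total_count_eq la lc "middle_age" h,
    total_count_eq la lc "senior" h]
  simp only [show (fun z : String × String => z.1 == "youth" && (z.2 == "yes")) = pY from rfl,
    show (fun z : String × String => z.1 == "middle_age" && (z.2 == "yes")) = pM from rfl,
    show (fun z : String × String => z.1 == "senior" && (z.2 == "yes")) = pS from rfl]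
  have h1 : (la.zip lc).countP pY + (la.zip lc).countP pYn
      = (la.zip lc).countP (fun z => z.1 == "youth") :=
    countP_split (la.zip lc) (fun z => z.1 == "youth") (fun z => z.2 == "yes")
  have h2 : (la.zip lc).countP pM + (la.zip lc).countP pMn
      = (la.zip lc).countP (fun z => z.1 == "middle_age") :=
    countP_split (la.zip lc) (fun z => z.1 == "middle_age") (fun z => z.2 == "yes")
  have h3 : (la.zip lc).countP pS + (la.zip lc).countP pSn
      = (la.zip lc).countP (fun z => z.1 == "senior") :=
    countP_split (la.zip lc) (fun z => z.1 == "senior") (fun z => z.2 == "yes")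
  refine Prod.ext rfl (Prod.ext ?_ (Prod.ext rfl (Prod.ext ?_ (Prod.ext rfl ?_)))) <;>
    simp only [] <;> omega

-- A: folding the per-element step over the zipped list adds the six class counts
lemma foldA_counts : ∀ (zs : List (String × String)) (s : Int × Int × Int × Int × Int × Int),
    zs.foldl (fun (s : Int × Int × Int × Int × Int × Int) z =>
        let p1 := selfCount z.1 z.2 "youth"
        let p2 := selfCount z.1 z.2 "middle_age"
        let p3 := selfCount z.1 z.2 "senior"
        (s.1 + p1.1, s.2.1 + p1.2, s.2.2.1 + p2.1, s.2.2.2.1 + p2.2,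
         s.2.2.2.2.1 + p3.1, s.2.2.2.2.2 + p3.2)) s
      = (s.1 + (zs.countP pY : Int), s.2.1 + (zs.countP pYn : Int),
         s.2.2.1 + (zs.countP pM : Int), s.2.2.2.1 + (zs.countP pMn : Int),
         s.2.2.2.2.1 + (zs.countP pS : Int), s.2.2.2.2.2 + (zs.countP pSn : Int)) := by
  intro zs
  induction zs with
  | nil => intro s; simp
  | cons z zs ih =>
    intro s
    rw [List.foldl_cons, ih]
    cases hy : z.1 == "youth" <;> cases hm : z.1 == "middle_age" <;>
      cases hs : z.1 == "senior" <;> cases hc : z.2 == "yes" <;>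
        simp [selfCount, pY, pYn, pM, pMn, pS, pSn, hy, hm, hs, hc] <;>
        (first
          | (push_cast; ring)
          | (constructor <;> trivial)
          | trivial)
    all_goals tauto

-- index loop over range(len(la)) = fold over the zipped list, when lc is long enough
lemma foldl_range_getD_zip {S : Type} (g : S → String → String → S) :
    ∀ (la lc : List String) (init : S), la.length ≤ lc.length →
      (List.range la.length).foldl (fun s k => g s (la.getD k "") (lc.getD k "")) init
        = (la.zip lc).foldl (fun s z => g s z.1 z.2) init := by
  intro la
  induction la with
  | nil => intro lc init _; simp
  | cons a la ih =>
    intro lc init h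
    cases lc with
    | nil => simp at h
    | cons c lc =>
      rw [show (a :: la).length = la.length + 1 from rfl,
        List.range_succ_eq_map, List.foldl_cons, List.foldl_map]
      simp only [List.getD_cons_zero, List.getD_cons_succ, List.zip_cons_cons, List.foldl_cons]
      exact ih lc (g init a c) (by simpa using h)

-- A's port rewritten as the zip fold
lemma A_eq_counts (la lc : List String) (h : la.length ≤ lc.length) :
    count_age_computer la lc =
      (((la.zip lc).countP pY : Int), ((la.zip lc).countP pYn : Int),
       ((la.zip lc).countP pM : Int), ((la.zip lc).countP pMn : Int),
       ((la.zip lc).countP pS : Int), ((la.zip lc).countP pSn : Int)) := by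
  unfold count_age_computer
  rw [PySem.List.pyRange_zero_nat, List.foldl_map]
  simp only [PySem.List.pyGetD_natCast]
  rw [foldl_range_getD_zip (fun s age cc =>
        let p1 := selfCount age cc "youth"
        let p2 := selfCount age cc "middle_age"
        let p3 := selfCount age cc "senior"
        (s.1 + p1.1, s.2.1 + p1.2, s.2.2.1 + p2.1, s.2.2.2.1 + p2.2,
         s.2.2.2.2.1 + p3.1, s.2.2.2.2.2 + p3.2)) la lc _ h]
  rw [foldA_counts]
  simp

-- ===== VERDICT (by name: the statement is the Claim_ definition above) =====
theorem count_age_computer_spec : Claim_equal_count_age_computer := by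
  intro la lc _ hpre
  unfold Spec_count_age_computer
  rw [A_eq_counts la lc hpre, alt_eq_counts la lc hpre]
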